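-- pv_equiv track=rewrite | github.com/pypi-data/pypi-mirror-357 | packages/tablevault/tablevault-0.1.1.tar.gz/tablevault-0.1.1/tablevault/_helper/metadata_store.py | check_top_process
-- ===== SOURCE A (Python) =====
-- def check_top_process(process_id, active_ids) -> tuple[bool, str]:
--     string_set = set(active_ids)
--     parts = process_id.split("_")
--     if len(parts) <= 1:
--         return True, process_id
--     for i in range(1, len(parts)):
--         prefix = "_".join(parts[:i])
--         if prefix in string_set:
--             return False, prefix
--     return True, process_id
-- ===== SOURCE B (Python) =====
-- def check_top_process(process_id, active_ids) -> tuple[bool, str]: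
--     # Scan the active ids once: a candidate is an active id that is a proper
--     # underscore-boundary prefix of process_id; keep the shortest one.
--     best = None
--     for aid in active_ids:
--         if process_id.startswith(aid + "_"):
--             if best is None or len(aid) < len(best):
--                 best = aid
--     if best is None:
--         return True, process_id
--     return False, best
-- ===== Notes on version B (the rewrite author's own statement) =====
-- stated objective: alternative
-- what changed: Instead of splitting process_id into parts and probing each underscore-joined prefix against a set of active_ids, B makes one pass over active_ids keeping the shortest aid with process_id.startswith(aid + '_'); no split, no prefix generation, no set.
import Mathlib
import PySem

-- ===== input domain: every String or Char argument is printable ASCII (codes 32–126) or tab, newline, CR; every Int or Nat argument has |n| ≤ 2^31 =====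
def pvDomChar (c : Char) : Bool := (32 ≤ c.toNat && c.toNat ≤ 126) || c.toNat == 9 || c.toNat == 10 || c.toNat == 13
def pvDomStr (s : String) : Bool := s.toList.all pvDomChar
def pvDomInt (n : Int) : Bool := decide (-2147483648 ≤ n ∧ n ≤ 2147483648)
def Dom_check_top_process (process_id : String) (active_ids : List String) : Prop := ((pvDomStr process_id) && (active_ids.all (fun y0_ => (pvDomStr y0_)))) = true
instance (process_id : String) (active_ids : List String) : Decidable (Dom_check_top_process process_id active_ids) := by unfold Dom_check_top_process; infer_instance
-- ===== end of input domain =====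

-- B replaces A's split-and-probe-each-prefix-in-a-set by a single scan of active_ids
-- keeping the shortest aid with process_id.startswith(aid + "_") (objective: alternative).

-- ===== PORT A =====
-- the 'for i in range(1, len(parts))' loop with its early return
def check_top_process_loopA (process_id : String) (string_set : PySem.Set String)
    (parts : List String) : List Int → Bool × String
  | [] => (true, process_id)
  | i :: rest =>
    let pre := PySem.Str.join "_" (PySem.List.slice parts none (some i))
    if PySem.Set.contains string_set pre then (false, pre)
    else check_top_process_loopA process_id string_set parts rest

def check_top_process (process_id : String) (active_ids : List String) : Bool × String :=
  let string_set := PySem.Set.ofList active_ids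
  let parts := (PySem.Str.split? process_id "_").getD []   -- sep "_" ≠ "", so split? is always `some`
  if PySem.List.len parts ≤ 1 then (true, process_id)
  else check_top_process_loopA process_id string_set parts
    (PySem.List.pyRange 1 (PySem.List.len parts) 1)

-- ===== PORT B =====
def check_top_process_alt (process_id : String) (active_ids : List String) : Bool × String :=
  let best := active_ids.foldl (fun best aid =>
    if PySem.Str.startswith process_id (aid ++ "_") then
      match best with
      | none => some aid
      | some b => if PySem.Str.len aid < PySem.Str.len b then some aid else some b
    else best) (none : Option String)
  match best with
  | none => (true, process_id)
  | some b => (false, b)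

-- ===== PRECONDITION & SPEC =====
def Spec_check_top_process (process_id : String) (active_ids : List String) (out : Bool × String) : Prop := out = check_top_process_alt process_id active_ids
instance (process_id : String) (active_ids : List String) (out : Bool × String) : Decidable (Spec_check_top_process process_id active_ids out) := by unfold Spec_check_top_process; infer_instance

-- ===== CLAIM (what is proved, stated in full; the proofs are below) =====
def Claim_equal_check_top_process : Prop := ∀ (process_id : String) (active_ids : List String), Dom_check_top_process process_id active_ids → Spec_check_top_process process_id active_ids (check_top_process process_id active_ids)

-- ===== LEMMAS AND PROOFS =====

-- structural single-'_' splitter: sp cur l = splitOn.go's meaning with accumulator cur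
def pvSp (cur : List Char) : List Char → List (List Char)
  | [] => [cur.reverse]
  | c :: rest => if c = '_' then cur.reverse :: pvSp [] rest else pvSp (c :: cur) rest

theorem pvSp_ne_nil (cur l : List Char) : pvSp cur l ≠ [] := by
  induction l generalizing cur with
  | nil => simp [pvSp]
  | cons c rest ih => by_cases h : c = '_' <;> simp [pvSp, h, ih]

theorem pvGo_spec (l : List Char) : ∀ (fuel : Nat) (cur : List Char) (acc : List (List Char)),
    l.length < fuel →
    PySem.Chars.splitOn.go ['_'] fuel l cur acc = acc.reverse ++ pvSp cur l := by
  induction l with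
  | nil =>
    intro fuel cur acc h
    match fuel with
    | f + 1 => rw [PySem.Chars.splitOn.go.eq_2] <;> simp [pvSp]
  | cons c rest ih =>
    intro fuel cur acc h
    match fuel with
    | f + 1 =>
      rw [PySem.Chars.splitOn.go.eq_3]
      by_cases hc : c = '_'
      · subst hc
        have hp : (['_'].isPrefixOf ('_' :: rest)) = true := by simp [List.isPrefixOf]
        simp only [hp, if_true, List.length_cons, List.length_nil, List.drop_succ_cons,
          List.drop_zero]
        simp only [List.length_cons] at h
        rw [ih f [] (cur.reverse :: acc) (by omega)]
        simp [pvSp]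
      · have : (['_'].isPrefixOf (c :: rest)) = false := by
          simp [List.isPrefixOf]; exact fun h' => absurd h'.symm hc
        rw [this]
        simp only [Bool.false_eq_true, if_false]
        rw [ih f (c :: cur) acc (by simp at h; omega)]
        simp [pvSp, hc]

theorem pvSplitOn_eq (cs : List Char) : PySem.Chars.splitOn cs ['_'] = pvSp [] cs := by
  rw [PySem.Chars.splitOn.eq_1, pvGo_spec cs (cs.length + 1) [] [] (by omega)]
  simp

-- join of a cons with a nonempty tail
theorem pvJoin_cons (p : List Char) (Q : List (List Char)) (h : Q ≠ []) :
    PySem.Chars.join ['_'] (p :: Q) = p ++ '_' :: PySem.Chars.join ['_'] Q := by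
  match Q with
  | [] => exact absurd rfl h
  | q :: qs => rw [PySem.Chars.join_cons_cons]; simp

theorem pvJoin_sp (l cur : List Char) :
    PySem.Chars.join ['_'] (pvSp cur l) = cur.reverse ++ l := by
  induction l generalizing cur with
  | nil => simp [pvSp, PySem.Chars.join_singleton]
  | cons c rest ih =>
    by_cases h : c = '_'
    · subst h
      have hstep : pvSp cur ('_' :: rest) = cur.reverse :: pvSp [] rest := by simp [pvSp]
      rw [hstep, pvJoin_cons _ _ (pvSp_ne_nil [] rest), ih []]
      simp
    · have hstep : pvSp cur (c :: rest) = pvSp (c :: cur) rest := by simp [pvSp, h]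
      rw [hstep, ih (c :: cur)]
      simp

theorem pvSp_no_us (l : List Char) : ∀ (cur : List Char), '_' ∉ cur →
    ∀ p ∈ pvSp cur l, '_' ∉ p := by
  induction l with
  | nil =>
    intro cur hcur p hmem
    simp [pvSp] at hmem
    subst hmem; simpa using hcur
  | cons c rest ih =>
    intro cur hcur p hmem
    by_cases h : c = '_'
    · subst h
      have hstep : pvSp cur ('_' :: rest) = cur.reverse :: pvSp [] rest := by simp [pvSp]
      rw [hstep] at hmem
      rcases List.mem_cons.mp hmem with hm | hm
      · subst hm; simpa using hcur
      · exact ih [] (by simp) p hm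
    · have hstep : pvSp cur (c :: rest) = pvSp (c :: cur) rest := by simp [pvSp, h]
      rw [hstep] at hmem
      exact ih (c :: cur) (by simp [hcur, Ne.symm h]) p hmem

-- join is monotone w.r.t. list-of-parts prefixes
theorem pvJoin_mono (Q₁ : List (List Char)) : ∀ (Q₂ : List (List Char)), Q₁ <+: Q₂ →
    PySem.Chars.join ['_'] Q₁ <+: PySem.Chars.join ['_'] Q₂ := by
  induction Q₁ with
  | nil => intro Q₂ _; simp [PySem.Chars.join_nil]
  | cons q Q₁' ih =>
    intro Q₂ hpre
    match Q₂ with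
    | [] => exact absurd (List.eq_nil_of_prefix_nil hpre) (by simp)
    | q₂ :: Q₂' =>
      obtain ⟨hq, htail⟩ := List.cons_prefix_cons.mp hpre
      subst hq
      cases Q₁' with
      | nil =>
        rw [PySem.Chars.join_singleton]
        match Q₂' with
        | [] => rw [PySem.Chars.join_singleton]
        | r :: rs =>
          rw [PySem.Chars.join_cons_cons]
          simpa [List.append_assoc] using
            List.prefix_append q (['_'] ++ PySem.Chars.join ['_'] (r :: rs))
      | cons p ps =>
        have hQ₂' : Q₂' ≠ [] := by
          intro hnil; subst hnil
          exact absurd (List.eq_nil_of_prefix_nil htail) (by simp)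
        rw [pvJoin_cons _ _ (by simp), pvJoin_cons _ _ hQ₂']
        exact (List.prefix_append_right_inj q).mpr
          (List.cons_prefix_cons.mpr ⟨rfl, ih Q₂' htail⟩)

-- forward: each proper boundary prefix, with its '_', is a prefix of the whole
theorem pvFwd (P : List (List Char)) : ∀ (i : Nat), 1 ≤ i → i < P.length →
    PySem.Chars.join ['_'] (P.take i) ++ ['_'] <+: PySem.Chars.join ['_'] P := by
  induction P with
  | nil => intro i h1 h2; simp at h2
  | cons p₀ P' ih =>
    intro i h1 h2
    simp only [List.length_cons] at h2
    have hP' : P' ≠ [] := by intro h; subst h; simp at h2; omega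
    rw [pvJoin_cons p₀ P' hP']
    match i with
    | 1 =>
      simp only [List.take_succ_cons, List.take_zero, PySem.Chars.join_singleton]
      exact ⟨PySem.Chars.join ['_'] P', by simp⟩
    | (j + 2) =>
      have hj : 1 ≤ j + 1 := by omega
      have hj2 : j + 1 < P'.length := by omega
      have htake : P'.take (j+1) ≠ [] := by
        intro h
        have := List.take_eq_nil_iff.mp h
        rcases this with h' | h' <;> simp_all
      rw [List.take_succ_cons, pvJoin_cons p₀ _ htake]
      have h3 : (p₀ ++ '_' :: PySem.Chars.join ['_'] (P'.take (j+1))) ++ ['_']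
          = p₀ ++ '_' :: (PySem.Chars.join ['_'] (P'.take (j+1)) ++ ['_']) := by simp
      rw [h3]
      exact (List.prefix_append_right_inj p₀).mpr
        (List.cons_prefix_cons.mpr ⟨rfl, ih (j+1) hj hj2⟩)

-- backward: any string whose '_'-extension is a prefix of the whole is a boundary prefix
theorem pvBwd (P : List (List Char)) : ∀ (q : List Char),
    (∀ p ∈ P, '_' ∉ p) → P ≠ [] →
    q ++ ['_'] <+: PySem.Chars.join ['_'] P →
    ∃ i : Nat, 1 ≤ i ∧ i < P.length ∧ q = PySem.Chars.join ['_'] (P.take i) := by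
  induction P with
  | nil => intro q _ h _; exact absurd rfl h
  | cons p₀ P' ih =>
    intro q hfree _ hpre
    cases P' with
    | nil =>
      rw [PySem.Chars.join_singleton] at hpre
      exact absurd (hpre.subset (by simp)) (hfree p₀ (by simp))
    | cons r rs =>
      rw [pvJoin_cons p₀ (r :: rs) (by simp)] at hpre
      rcases Nat.lt_trichotomy q.length p₀.length with hlt | heq | hgt
      · -- impossible: the '_' would sit inside p₀
        have h1 : q ++ ['_'] <+: p₀ := by
          refine List.prefix_of_prefix_length_le hpre (List.prefix_append _ _) ?_
          simp; omega
        exact absurd (h1.subset (by simp)) (hfree p₀ (by simp))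
      · -- q = p₀, the first part
        have h1 : q <+: p₀ := by
          refine List.prefix_of_prefix_length_le ((List.prefix_append q ['_']).trans hpre)
            (List.prefix_append _ _) (by omega)
        have hq : q = p₀ := h1.eq_of_length heq
        refine ⟨1, le_refl 1, by simp, ?_⟩
        simp [hq, PySem.Chars.join_singleton]
      · -- q extends past p₀ ++ '_'
        have h1 : p₀ <+: q := by
          refine List.prefix_of_prefix_length_le (List.prefix_append _ _)
            ((List.prefix_append q ['_']).trans hpre) (by omega)
        obtain ⟨t, ht⟩ := h1
        subst ht
        rw [List.append_assoc, List.prefix_append_right_inj] at hpre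
        cases t with
        | nil => simp at hgt
        | cons c t' =>
          obtain ⟨hc, hrest⟩ := List.cons_prefix_cons.mp hpre
          subst hc
          obtain ⟨i', hi'1, hi'2, hi'3⟩ :=
            ih t' (fun p hp => hfree p (by simp [hp])) (by simp) hrest
          have htake : (r :: rs).take i' ≠ [] := by
            intro h
            rcases List.take_eq_nil_iff.mp h with h' | h' <;> simp_all
          refine ⟨i' + 1, by omega, by simp only [List.length_cons] at hi'2 ⊢; omega, ?_⟩
          rw [List.take_succ_cons, pvJoin_cons p₀ _ htake, hi'3]

-- candidate test of B, expressed on char lists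
theorem pvStartswith_iff (pid aid : String) :
    PySem.Str.startswith pid (aid ++ "_") = true ↔ (aid.toList ++ ['_']) <+: pid.toList := by
  rw [PySem.Str.startswith, PySem.Chars.startswith_iff, String.toList_append]
  have : ("_" : String).toList = ['_'] := by decide
  rw [this]

-- A's loop: no hit
theorem pvLoopA_none (pid : String) (S : PySem.Set String) (parts : List String)
    (idxs : List Int)
    (h : ∀ i ∈ idxs, ¬ PySem.Set.contains S (PySem.Str.join "_" (PySem.List.slice parts none (some i))) = true) :
    check_top_process_loopA pid S parts idxs = (true, pid) := by
  induction idxs with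
  | nil => rfl
  | cons i rest ih =>
    simp only [check_top_process_loopA]
    rw [if_neg (h i (by simp))]
    exact ih (fun j hj => h j (by simp [hj]))

-- A's loop: first hit
theorem pvLoopA_found (pid : String) (S : PySem.Set String) (parts : List String)
    (l₁ : List Int) (i : Int) (l₂ : List Int)
    (h₁ : ∀ j ∈ l₁, ¬ PySem.Set.contains S (PySem.Str.join "_" (PySem.List.slice parts none (some j))) = true)
    (h₂ : PySem.Set.contains S (PySem.Str.join "_" (PySem.List.slice parts none (some i))) = true) :
    check_top_process_loopA pid S parts (l₁ ++ i :: l₂) =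
      (false, PySem.Str.join "_" (PySem.List.slice parts none (some i))) := by
  induction l₁ with
  | nil =>
    simp only [List.nil_append, check_top_process_loopA]
    rw [if_pos h₂]
  | cons j rest ih =>
    rw [List.cons_append]
    simp only [check_top_process_loopA]
    rw [if_neg (h₁ j (by simp))]
    exact ih (fun k hk => h₁ k (by simp [hk]))

-- B's fold invariant: the accumulator is the shortest boundary-prefix candidate so far
theorem pvFoldB (pid : String) (l : List String) : ∀ (acc res : Option String),
    (∀ b, acc = some b → PySem.Str.startswith pid (b ++ "_") = true) →
    l.foldl (fun best aid =>
      if PySem.Str.startswith pid (aid ++ "_") then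
        match best with
        | none => some aid
        | some b => if PySem.Str.len aid < PySem.Str.len b then some aid else some b
      else best) acc = res →
    (res = none → acc = none ∧ ∀ aid ∈ l, ¬ PySem.Str.startswith pid (aid ++ "_") = true) ∧
    (∀ b, res = some b → PySem.Str.startswith pid (b ++ "_") = true ∧
      (b ∈ l ∨ acc = some b) ∧
      (∀ aid ∈ l, PySem.Str.startswith pid (aid ++ "_") = true →
        b.toList.length ≤ aid.toList.length) ∧
      (∀ b₀, acc = some b₀ → b.toList.length ≤ b₀.toList.length)) := by
  induction l with
  | nil =>
    intro acc res hacc hres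
    simp only [List.foldl_nil] at hres
    subst hres
    constructor
    · intro h; exact ⟨h, by simp⟩
    · intro b hb
      refine ⟨hacc b hb, Or.inr hb, by simp, ?_⟩
      intro b₀ h₀
      rw [hb] at h₀
      cases h₀
      omega
  | cons aid rest ih =>
    intro acc res hacc hres
    rw [List.foldl_cons] at hres
    by_cases hsw : PySem.Str.startswith pid (aid ++ "_") = true
    · cases acc with
      | none =>
        simp only [hsw] at hres
        obtain ⟨h1, h2⟩ := ih (some aid) res (by intro b hb; cases hb; exact hsw) hres
        constructor
        · intro h; exact absurd (h1 h).1 (by simp)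
        · intro b hb
          obtain ⟨hb1, hb2, hb3, hb4⟩ := h2 b hb
          refine ⟨hb1, ?_, ?_, by simp⟩
          · rcases hb2 with h | h
            · exact Or.inl (by simp [h])
            · cases h; exact Or.inl (by simp)
          · intro a ha hca
            rcases List.mem_cons.mp ha with ha | ha
            · subst ha; exact hb4 a rfl
            · exact hb3 a ha hca
      | some b₀ =>
        by_cases hlt : PySem.Str.len aid < PySem.Str.len b₀
        · simp only [hsw, hlt] at hres
          obtain ⟨h1, h2⟩ := ih (some aid) res (by intro b hb; cases hb; exact hsw) hres
          constructor
          · intro h; exact absurd (h1 h).1 (by simp)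
          · intro b hb
            obtain ⟨hb1, hb2, hb3, hb4⟩ := h2 b hb
            have hltn : aid.toList.length ≤ b₀.toList.length := by
              have : (aid.toList.length : Int) < (b₀.toList.length : Int) := by
                simpa [PySem.Str.len] using hlt
              omega
            refine ⟨hb1, ?_, ?_, ?_⟩
            · rcases hb2 with h | h
              · exact Or.inl (by simp [h])
              · cases h; exact Or.inl (by simp)
            · intro a ha hca
              rcases List.mem_cons.mp ha with ha | ha
              · subst ha; exact hb4 a rfl
              · exact hb3 a ha hca
            · intro c hc
              cases hc
              have := hb4 aid rfl
              omega
        · simp only [hsw, hlt] at hres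
          obtain ⟨h1, h2⟩ := ih (some b₀) res hacc hres
          constructor
          · intro h; exact absurd (h1 h).1 (by simp)
          · intro b hb
            obtain ⟨hb1, hb2, hb3, hb4⟩ := h2 b hb
            have hgen : b₀.toList.length ≤ aid.toList.length := by
              have : ¬ ((aid.toList.length : Int) < (b₀.toList.length : Int)) := by
                simpa [PySem.Str.len] using hlt
              omega
            refine ⟨hb1, ?_, ?_, hb4⟩
            · rcases hb2 with h | h
              · exact Or.inl (by simp [h])
              · exact Or.inr h
            · intro a ha hca
              rcases List.mem_cons.mp ha with ha | ha
              · subst ha; have := hb4 b₀ rfl; omega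
              · exact hb3 a ha hca
    · simp only [hsw] at hres
      obtain ⟨h1, h2⟩ := ih acc res hacc hres
      constructor
      · intro h
        refine ⟨(h1 h).1, ?_⟩
        intro a ha
        rcases List.mem_cons.mp ha with ha | ha
        · subst ha; exact hsw
        · exact (h1 h).2 a ha
      · intro b hb
        obtain ⟨hb1, hb2, hb3, hb4⟩ := h2 b hb
        refine ⟨hb1, ?_, ?_, hb4⟩
        · rcases hb2 with h | h
          · exact Or.inl (by simp [h])
          · exact Or.inr h
        · intro a ha hca
          rcases List.mem_cons.mp ha with ha | ha
          · subst ha; exact absurd hca hsw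
          · exact hb3 a ha hca

-- characterization of B's result
theorem pvAlt_spec (pid : String) (ids : List String) :
    ((∀ aid ∈ ids, ¬ PySem.Str.startswith pid (aid ++ "_") = true) ∧
      check_top_process_alt pid ids = (true, pid)) ∨
    (∃ b, check_top_process_alt pid ids = (false, b) ∧
      PySem.Str.startswith pid (b ++ "_") = true ∧ b ∈ ids ∧
      ∀ aid ∈ ids, PySem.Str.startswith pid (aid ++ "_") = true →
        b.toList.length ≤ aid.toList.length) := by
  rcases hres : ids.foldl (fun best aid =>
      if PySem.Str.startswith pid (aid ++ "_") then
        match best with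
        | none => some aid
        | some b => if PySem.Str.len aid < PySem.Str.len b then some aid else some b
      else best) (none : Option String) with _ | b
  · obtain ⟨h1, _⟩ := pvFoldB pid ids none none (by simp) hres
    refine Or.inl ⟨(h1 rfl).2, ?_⟩
    simp only [check_top_process_alt]
    rw [hres]
  · obtain ⟨_, h2⟩ := pvFoldB pid ids none (some b) (by simp) hres
    obtain ⟨hb1, _, hb3, _⟩ := h2 b rfl
    refine Or.inr ⟨b, ?_, hb1, ?_, hb3⟩
    · simp only [check_top_process_alt]
      rw [hres]
    · rcases (h2 b rfl).2.1 with h | h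
      · exact h
      · exact absurd h (by simp)

-- ===== VERDICT (by name: the statement is the Claim_ definition above) =====
theorem check_top_process_spec : Claim_equal_check_top_process := by
  intro pid ids _
  unfold Spec_check_top_process
  have husl : ("_" : String).toList = ['_'] := by decide
  have hPne : pvSp [] pid.toList ≠ [] := pvSp_ne_nil [] pid.toList
  set P : List (List Char) := pvSp [] pid.toList with hP
  have hJall : PySem.Chars.join ['_'] P = pid.toList := by
    rw [hP, pvJoin_sp]; simp
  have hfree : ∀ p ∈ P, '_' ∉ p := pvSp_no_us pid.toList [] (by simp)
  have hsplit : PySem.Str.split? pid "_" = some (P.map String.ofList) := by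
    rw [PySem.Str.split?, husl, PySem.Chars.split?]
    simp [pvSplitOn_eq, hP]
  have hpre : ∀ k : Nat,
      PySem.Str.join "_" (PySem.List.slice (P.map String.ofList) none (some (k : Int)))
        = String.ofList (PySem.Chars.join ['_'] (P.take k)) := by
    intro k
    rw [PySem.List.slice_to _ (by omega : (0:Int) ≤ (k:Int))]
    rw [PySem.Str.join, husl]
    congr 2
    rw [Int.toNat_natCast, ← List.map_take, List.map_map]
    simp [Function.comp_def]
  have hmem : ∀ x : String, (PySem.Set.contains (PySem.Set.ofList ids) x = true) ↔ x ∈ ids := by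
    intro x; rw [PySem.Set.contains_iff, PySem.Set.mem_ofList]
  have hJpre : ∀ k : Nat, 1 ≤ k → k < P.length →
      PySem.Chars.join ['_'] (P.take k) ++ ['_'] <+: pid.toList := by
    intro k h1 h2; rw [← hJall]; exact pvFwd P k h1 h2
  have hlenmap : PySem.List.len (P.map String.ofList) = (P.length : Int) := by
    simp [PySem.List.len]
  by_cases hex : ∃ k : Nat, 1 ≤ k ∧ k < P.length ∧
      String.ofList (PySem.Chars.join ['_'] (P.take k)) ∈ ids
  · -- some active id is a proper boundary prefix: both return (False, shortest one)
    obtain ⟨hk1, hk2, hk3⟩ := Nat.find_spec hex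
    set k₀ := Nat.find hex with hk₀
    set a₀ : String := String.ofList (PySem.Chars.join ['_'] (P.take k₀)) with ha₀
    have hswa₀ : PySem.Str.startswith pid (a₀ ++ "_") = true := by
      rw [pvStartswith_iff, ha₀, String.toList_ofList]
      exact hJpre k₀ hk1 hk2
    have hB : check_top_process_alt pid ids = (false, a₀) := by
      rcases pvAlt_spec pid ids with ⟨hall, _⟩ | ⟨b, hb, hsw, hbmem, hmin⟩
      · exact absurd hswa₀ (hall a₀ hk3)
      · have h1 : b.toList ++ ['_'] <+: pid.toList := (pvStartswith_iff pid b).mp hsw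
        rw [← hJall] at h1
        obtain ⟨i, hi1, hi2, hi3⟩ := pvBwd P b.toList hfree hPne h1
        have hk₀le : k₀ ≤ i := Nat.find_min' hex
          ⟨hi1, hi2, by rw [← hi3, String.ofList_toList]; exact hbmem⟩
        have hmono : PySem.Chars.join ['_'] (P.take k₀) <+: PySem.Chars.join ['_'] (P.take i) :=
          pvJoin_mono _ _ (List.take_prefix_take_left hk₀le)
        have hlen1 : (PySem.Chars.join ['_'] (P.take k₀)).length ≤ b.toList.length := by
          rw [hi3]; exact hmono.length_le
        have hlen2 : b.toList.length ≤ (PySem.Chars.join ['_'] (P.take k₀)).length := by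
          have := hmin a₀ hk3 hswa₀
          rwa [ha₀, String.toList_ofList] at this
        have hpb : b.toList <+: pid.toList := by
          rw [hi3]
          exact (List.prefix_append _ ['_']).trans (hJpre i hi1 hi2)
        have hpa : PySem.Chars.join ['_'] (P.take k₀) <+: pid.toList :=
          (List.prefix_append _ ['_']).trans (hJpre k₀ hk1 hk2)
        have hbeq : b.toList = PySem.Chars.join ['_'] (P.take k₀) :=
          (List.prefix_of_prefix_length_le hpb hpa hlen2).eq_of_length (by omega)
        have : b = a₀ := String.ext (by rw [hbeq, ha₀, String.toList_ofList])
        rw [hb, this]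
    rw [hB]
    simp only [check_top_process, hsplit, Option.getD_some, hlenmap]
    rw [if_neg (by omega)]
    have hrange : PySem.List.pyRange 1 (P.length : Int) 1 =
        PySem.List.pyRange 1 (k₀ : Int) 1 ++
          (k₀ : Int) :: PySem.List.pyRange ((k₀ : Int) + 1) (P.length : Int) 1 := by
      rw [PySem.List.pyRange_one_append 1 (k₀ : Int) (P.length : Int) (by omega) (by omega)]
      congr 1
      exact PySem.List.pyRange_one_cons (a := (k₀ : Int)) (b := (P.length : Int)) (by omega)
    rw [hrange]
    rw [pvLoopA_found pid (PySem.Set.ofList ids) (P.map String.ofList) _ _ _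
      (by
        intro j hj
        obtain ⟨hj1, hj2⟩ := PySem.List.mem_pyRange_one.mp hj
        have hjn : j = ((j.toNat : Nat) : Int) := by omega
        rw [hjn, hpre j.toNat, hmem]
        have hnot := Nat.find_min hex (by omega : j.toNat < k₀)
        intro hc
        exact hnot ⟨by omega, by omega, hc⟩)
      (by rw [hpre k₀, hmem]; exact hk3)]
    rw [hpre k₀]
  · -- no active id is a proper boundary prefix: both return (True, process_id)
    have hnc : ∀ aid ∈ ids, ¬ PySem.Str.startswith pid (aid ++ "_") = true := by
      intro aid ha hsw
      rw [pvStartswith_iff] at hsw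
      rw [← hJall] at hsw
      obtain ⟨i, hi1, hi2, hi3⟩ := pvBwd P aid.toList hfree hPne hsw
      exact hex ⟨i, hi1, hi2, by rw [← hi3, String.ofList_toList]; exact ha⟩
    have hB : check_top_process_alt pid ids = (true, pid) := by
      rcases pvAlt_spec pid ids with ⟨_, h⟩ | ⟨b, _, hsw, hbmem, _⟩
      · exact h
      · exact absurd hsw (hnc b hbmem)
    rw [hB]
    simp only [check_top_process, hsplit, Option.getD_some, hlenmap]
    by_cases hg : (P.length : Int) ≤ 1
    · rw [if_pos hg]
    · rw [if_neg hg]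
      apply pvLoopA_none
      intro i hi
      obtain ⟨hi1, hi2⟩ := PySem.List.mem_pyRange_one.mp hi
      have hin : i = ((i.toNat : Nat) : Int) := by omega
      rw [hin, hpre i.toNat, hmem]
      intro hc
      exact hex ⟨i.toNat, by omega, by omega, hc⟩
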